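-- pv_equiv track=rewrite | github.com/grapheneaffiliate/h4-polytopic-attention | solve_arc_b18.py | solve_b9b7f026
-- ===== SOURCE A (Python) =====
-- def solve_b9b7f026(grid):
--     """Multiple filled rectangles. One has holes (0s inside). Output its color."""
--     rows = len(grid)
--     cols = len(grid[0])
--
--     visited = [[False]*cols for _ in range(rows)]
--
--     def flood_fill(r, c, color):
--         stack = [(r, c)]
--         cells = []
--         while stack:
--             cr, cc = stack.pop()
--             if cr < 0 or cr >= rows or cc < 0 or cc >= cols:
--                 continue
--             if visited[cr][cc] or grid[cr][cc] != color:
--                 continue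
--             visited[cr][cc] = True
--             cells.append((cr, cc))
--             for dr, dc in [(-1,0),(1,0),(0,-1),(0,1)]:
--                 stack.append((cr+dr, cc+dc))
--         return cells
--
--     for r in range(rows):
--         for c in range(cols):
--             if grid[r][c] != 0 and not visited[r][c]:
--                 color = grid[r][c]
--                 cells = flood_fill(r, c, color)
--
--                 min_r2 = min(cr for cr, cc in cells)
--                 max_r2 = max(cr for cr, cc in cells)
--                 min_c2 = min(cc for cr, cc in cells)
--                 max_c2 = max(cc for cr, cc in cells)
--
--                 expected_area = (max_r2 - min_r2 + 1) * (max_c2 - min_c2 + 1)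
--                 actual_area = len(cells)
--
--                 if actual_area < expected_area:
--                     return [[color]]
--
--     return [[0]]
-- ===== SOURCE B (Python) =====
-- def solve_b9b7f026(grid):
--     """Multiple filled rectangles. One has holes (0s inside). Output its color.
--
--     Components are grown by whole-frontier set saturation (no per-cell stack,
--     no boolean matrix); each component is summarized by its size and bounding box.
--     """
--     rows = len(grid)
--     cols = len(grid[0])
--     seen = set()
--     for r in range(rows):
--         for c in range(cols):
--             color = grid[r][c]
--             if color != 0 and (r, c) not in seen:
--                 comp = {(r, c)}
--                 frontier = {(r, c)}
--                 while frontier: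
--                     nxt = set()
--                     for fr, fc in frontier:
--                         for nr, nc in ((fr - 1, fc), (fr + 1, fc), (fr, fc - 1), (fr, fc + 1)):
--                             if 0 <= nr < rows and 0 <= nc < cols and (nr, nc) not in comp and grid[nr][nc] == color:
--                                 nxt.add((nr, nc))
--                     comp |= nxt
--                     frontier = nxt
--                 seen |= comp
--                 height = max(p[0] for p in comp) - min(p[0] for p in comp) + 1
--                 width = max(p[1] for p in comp) - min(p[1] for p in comp) + 1
--                 if len(comp) < height * width:
--                     return [[color]]
--     return [[0]]
-- ===== Notes on version B (the rewrite author's own statement) =====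
-- stated objective: alternative
-- what changed: Replaces A's per-cell explicit-stack flood fill over a mutated boolean visited matrix (collecting each component as a list of cells) by whole-frontier set saturation: each component is grown as a set by repeatedly adding all fresh same-color neighbours of the entire frontier, and summarized by its size and bounding box; a seen-set replaces the visited matrix.
-- outside the precondition, e.g. on solve_b9b7f026([[5, 5], [5, 0], [7]]): A returns [[5]], B returns [[5]]
import Mathlib
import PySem

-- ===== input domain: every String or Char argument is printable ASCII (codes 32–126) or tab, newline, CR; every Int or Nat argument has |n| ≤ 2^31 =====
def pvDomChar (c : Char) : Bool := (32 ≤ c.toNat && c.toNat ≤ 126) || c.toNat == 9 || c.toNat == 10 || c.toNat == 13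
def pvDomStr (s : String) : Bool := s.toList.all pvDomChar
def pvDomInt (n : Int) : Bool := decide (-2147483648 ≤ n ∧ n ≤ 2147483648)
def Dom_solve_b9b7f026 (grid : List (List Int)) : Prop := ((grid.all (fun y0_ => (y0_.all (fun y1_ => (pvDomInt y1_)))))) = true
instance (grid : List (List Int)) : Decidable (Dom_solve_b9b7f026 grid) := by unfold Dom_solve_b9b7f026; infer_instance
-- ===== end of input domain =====

-- B replaces A's per-cell stack flood fill over a boolean matrix by whole-frontier set
-- saturation with per-component (size, bounding box) summaries: an alternative traversal,
-- not claimed faster. Return-value equivalence only (A mutates no argument).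

-- ===== PORT A =====

-- grid[r][c] / visited[r][c]; every call site has already checked 0 ≤ r < rows, 0 ≤ c < cols
-- (and Pre_ makes rows long enough), so the defaults are never hit and getD is exact.
def pvGGet (grid : List (List Int)) (r c : Int) : Int := (grid.getD r.toNat []).getD c.toNat 0

def pvVGet (V : List (List Bool)) (r c : Int) : Bool := (V.getD r.toNat []).getD c.toNat false

def pvVSet (V : List (List Bool)) (r c : Int) : List (List Bool) :=
  V.set r.toNat ((V.getD r.toNat []).set c.toNat true)

-- flood_fill: the while-stack loop; stack top at the HEAD (Python appends to the end and
-- pops the end, so the four pushes appear here in reversed order). fuel is a guard making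
-- the loop total; it is chosen large enough to be unreachable (proved below).
def pvFillA (grid : List (List Int)) (rows cols color : Int) :
    Nat → List (Int × Int) → List (List Bool) → List (Int × Int) →
    List (List Bool) × List (Int × Int)
  | 0, _, V, cells => (V, cells)
  | _ + 1, [], V, cells => (V, cells)
  | f + 1, (cr, cc) :: S, V, cells =>
    if cr < 0 ∨ rows ≤ cr ∨ cc < 0 ∨ cols ≤ cc then
      pvFillA grid rows cols color f S V cells
    else if pvVGet V cr cc = true ∨ pvGGet grid cr cc ≠ color then
      pvFillA grid rows cols color f S V cells
    else
      pvFillA grid rows cols color f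
        ((cr, cc + 1) :: (cr, cc - 1) :: (cr + 1, cc) :: (cr - 1, cc) :: S)
        (pvVSet V cr cc) (cells ++ [(cr, cc)])

-- inner `for c in range(cols)` loop; .inl = early return, .inr = updated visited
def pvColsA (grid : List (List Int)) (rows cols r : Int) :
    List Int → List (List Bool) → Sum (List (List Int)) (List (List Bool))
  | [], V => Sum.inr V
  | c :: cs, V =>
    let color := pvGGet grid r c
    if color ≠ 0 ∧ ¬(pvVGet V r c = true) then
      let res := pvFillA grid rows cols color (5 * (rows.toNat * cols.toNat) + 1) [(r, c)] V []
      let cells := res.2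
      -- cells is never empty (the seed is always collected), so min/max never raise; getD 0 unreachable
      let minR := (PySem.List.min? (cells.map Prod.fst) (fun x => x)).getD 0
      let maxR := (PySem.List.max? (cells.map Prod.fst) (fun x => x)).getD 0
      let minC := (PySem.List.min? (cells.map Prod.snd) (fun x => x)).getD 0
      let maxC := (PySem.List.max? (cells.map Prod.snd) (fun x => x)).getD 0
      let expected := (maxR - minR + 1) * (maxC - minC + 1)
      if (cells.length : Int) < expected then Sum.inl [[color]]
      else pvColsA grid rows cols r cs res.1
    else pvColsA grid rows cols r cs V

-- outer `for r in range(rows)` loop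
def pvRowsA (grid : List (List Int)) (rows cols : Int) :
    List Int → List (List Bool) → List (List Int)
  | [], _ => [[0]]
  | r :: rs, V =>
    match pvColsA grid rows cols r (PySem.List.pyRange 0 cols 1) V with
    | Sum.inl ans => ans
    | Sum.inr V' => pvRowsA grid rows cols rs V'

def solve_b9b7f026 (grid : List (List Int)) : List (List Int) :=
  let rows : Int := grid.length
  let cols : Int := (grid.headD []).length   -- grid[0]; Pre_ excludes grid = [] (IndexError)
  pvRowsA grid rows cols (PySem.List.pyRange 0 rows 1)
    (List.replicate rows.toNat (List.replicate cols.toNat false))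

-- ===== PORT B =====

def pvNbrList (p : Int × Int) : List (Int × Int) :=
  [(p.1 - 1, p.2), (p.1 + 1, p.2), (p.1, p.2 - 1), (p.1, p.2 + 1)]

-- one candidate neighbour: add it to nxt when in range, new and of the right colour
def pvStepB (grid : List (List Int)) (rows cols color : Int) (comp : PySem.Set (Int × Int))
    (nxt : PySem.Set (Int × Int)) (q : Int × Int) : PySem.Set (Int × Int) :=
  if 0 ≤ q.1 ∧ q.1 < rows ∧ 0 ≤ q.2 ∧ q.2 < cols ∧ ¬(PySem.Set.contains comp q = true) ∧
      pvGGet grid q.1 q.2 = color then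
    PySem.Set.add nxt q
  else nxt

-- nxt = the set of fresh same-colour neighbours of the whole frontier
def pvNextB (grid : List (List Int)) (rows cols color : Int)
    (comp : PySem.Set (Int × Int)) (frontier : List (Int × Int)) : PySem.Set (Int × Int) :=
  frontier.foldl (fun nxt p => (pvNbrList p).foldl (pvStepB grid rows cols color comp) nxt)
    PySem.Set.empty

-- `while frontier:` saturation loop; fuel is a totality guard, unreachable (proved below)
def pvGrowB (grid : List (List Int)) (rows cols color : Int) :
    Nat → PySem.Set (Int × Int) → List (Int × Int) → PySem.Set (Int × Int)
  | 0, comp, _ => comp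
  | f + 1, comp, frontier =>
    if frontier.isEmpty then comp
    else
      let nxt := pvNextB grid rows cols color comp frontier
      pvGrowB grid rows cols color f (PySem.Set.union comp nxt) nxt

def pvColsB (grid : List (List Int)) (rows cols r : Int) :
    List Int → PySem.Set (Int × Int) → Sum (List (List Int)) (PySem.Set (Int × Int))
  | [], seen => Sum.inr seen
  | c :: cs, seen =>
    let color := pvGGet grid r c
    if color ≠ 0 ∧ ¬(PySem.Set.contains seen (r, c) = true) then
      let comp := pvGrowB grid rows cols color (rows.toNat * cols.toNat + 1)
        (PySem.Set.ofList [(r, c)]) [(r, c)]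
      let seen' := PySem.Set.union seen comp
      -- comp is nonempty (it contains the seed): max/min never raise, getD 0 unreachable
      let height := (PySem.List.max? (comp.map Prod.fst) (fun x => x)).getD 0 -
        (PySem.List.min? (comp.map Prod.fst) (fun x => x)).getD 0 + 1
      let width := (PySem.List.max? (comp.map Prod.snd) (fun x => x)).getD 0 -
        (PySem.List.min? (comp.map Prod.snd) (fun x => x)).getD 0 + 1
      if (PySem.Set.len comp : Int) < height * width then Sum.inl [[color]]
      else pvColsB grid rows cols r cs seen'
    else pvColsB grid rows cols r cs seen

def pvRowsB (grid : List (List Int)) (rows cols : Int) :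
    List Int → PySem.Set (Int × Int) → List (List Int)
  | [], _ => [[0]]
  | r :: rs, seen =>
    match pvColsB grid rows cols r (PySem.List.pyRange 0 cols 1) seen with
    | Sum.inl ans => ans
    | Sum.inr seen' => pvRowsB grid rows cols rs seen'

def solve_b9b7f026_alt (grid : List (List Int)) : List (List Int) :=
  let rows : Int := grid.length
  let cols : Int := (grid.headD []).length
  pvRowsB grid rows cols (PySem.List.pyRange 0 rows 1) PySem.Set.empty

-- ===== PRECONDITION & SPEC =====
-- Pre_ excludes the empty grid and ragged grids having a row shorter than the first row:
-- there Python A's raster scan in general hits an IndexError (on a few such grids A happens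
-- to return early before reaching the short row, and B returns the same value there).
def Pre_solve_b9b7f026 (grid : List (List Int)) : Prop :=
  grid ≠ [] ∧ ∀ row ∈ grid, (grid.headD []).length ≤ row.length
instance (grid : List (List Int)) : Decidable (Pre_solve_b9b7f026 grid) := by
  unfold Pre_solve_b9b7f026; infer_instance

def pvWitness_solve_b9b7f026 : List (List Int) := [[1, 0], [1, 1]]

def Spec_solve_b9b7f026 (grid : List (List Int)) (out : List (List Int)) : Prop :=
  out = solve_b9b7f026_alt grid
instance (grid : List (List Int)) (out : List (List Int)) : Decidable (Spec_solve_b9b7f026 grid out) := by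
  unfold Spec_solve_b9b7f026; infer_instance

-- ===== CLAIM (what is proved, stated in full; the proofs are below) =====
def Claim_equal_solve_b9b7f026 : Prop := ∀ (grid : List (List Int)), Dom_solve_b9b7f026 grid → Pre_solve_b9b7f026 grid → Spec_solve_b9b7f026 grid (solve_b9b7f026 grid)

-- ===== LEMMAS AND PROOFS =====

-- `Ok p`: p is in range and carries the colour being flooded
def pvOk (grid : List (List Int)) (rows cols color : Int) (p : Int × Int) : Prop :=
  0 ≤ p.1 ∧ p.1 < rows ∧ 0 ≤ p.2 ∧ p.2 < cols ∧ pvGGet grid p.1 p.2 = color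

def pvAdj (p q : Int × Int) : Prop := q ∈ pvNbrList p

-- a path of Ok cells avoiding V, from s to p (both programs compute its image)
inductive pvReach (grid : List (List Int)) (rows cols color : Int) (V : Int × Int → Prop) :
    (Int × Int) → (Int × Int) → Prop
  | refl (p : Int × Int) : pvOk grid rows cols color p → ¬V p →
      pvReach grid rows cols color V p p
  | step (p q r : Int × Int) : pvOk grid rows cols color p → ¬V p → pvAdj p q →
      pvReach grid rows cols color V q r → pvReach grid rows cols color V p r

def pvComp (grid : List (List Int)) (rows cols color : Int) (s p : Int × Int) : Prop :=
  pvReach grid rows cols color (fun _ => False) s p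

def pvVtrue (V : List (List Bool)) (p : Int × Int) : Prop :=
  0 ≤ p.1 ∧ 0 ≤ p.2 ∧ pvVGet V p.1 p.2 = true

def pvShape (rows cols : Int) (V : List (List Bool)) : Prop :=
  V.length = rows.toNat ∧ ∀ row ∈ V, row.length = cols.toNat

def pvCF (V : List (List Bool)) : Nat := (V.map (fun row => row.count false)).sum

-- ---- basic matrix lemmas ----

theorem pvGetDSetSelf {α : Type} (l : List α) (n : Nat) (a d : α) (h : n < l.length) :
    (l.set n a).getD n d = a := by
  rw [List.getD_eq_getElem?_getD, List.getElem?_set, if_pos rfl, if_pos h]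
  rfl

theorem pvGetDSetNe {α : Type} (l : List α) (m n : Nat) (a d : α) (h : m ≠ n) :
    (l.set m a).getD n d = l.getD n d := by
  rw [List.getD_eq_getElem?_getD, List.getElem?_set, if_neg h, ← List.getD_eq_getElem?_getD]

theorem pvShape_vset (rows cols : Int) (V : List (List Bool)) (r c : Int)
    (h : pvShape rows cols V) : pvShape rows cols (pvVSet V r c) := by
  obtain ⟨hlen, hrow⟩ := h
  by_cases hb : r.toNat < V.length
  · refine ⟨by simp [pvVSet, hlen], ?_⟩
    intro row hmem
    rcases List.mem_or_eq_of_mem_set hmem with h1 | h2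
    · exact hrow _ h1
    · subst h2
      rw [List.getD_eq_getElem _ _ hb, List.length_set]
      exact hrow _ (List.getElem_mem _)
  · rw [pvVSet, List.set_eq_of_length_le (by omega)]
    exact ⟨hlen, hrow⟩

theorem pvVtrue_vset (rows cols : Int) (V : List (List Bool)) (r c : Int)
    (h : pvShape rows cols V) (hr0 : 0 ≤ r) (hr : r < rows) (hc0 : 0 ≤ c) (hc : c < cols) :
    ∀ q, pvVtrue (pvVSet V r c) q ↔ (pvVtrue V q ∨ q = (r, c)) := by
  rintro ⟨qr, qc⟩
  obtain ⟨hlen, hrow⟩ := h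
  have hb : r.toNat < V.length := by omega
  have hrowlen : (V.getD r.toNat []).length = cols.toNat := by
    rw [List.getD_eq_getElem _ _ hb]; exact hrow _ (List.getElem_mem _)
  have hcb : c.toNat < (V.getD r.toNat []).length := by omega
  by_cases hq : 0 ≤ qr ∧ 0 ≤ qc
  · obtain ⟨hq1, hq2⟩ := hq
    by_cases hqr : qr = r
    · subst hqr
      by_cases hqc : qc = c
      · subst hqc
        simp only [pvVtrue, pvVSet, pvVGet]
        rw [pvGetDSetSelf _ _ _ _ hb, pvGetDSetSelf _ _ _ _ hcb]
        simp [hq1, hq2]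
      · have hqcn : c.toNat ≠ qc.toNat := by omega
        simp only [pvVtrue, pvVSet, pvVGet]
        rw [pvGetDSetSelf _ _ _ _ hb, pvGetDSetNe _ _ _ _ _ hqcn]
        simp only [Prod.mk.injEq]
        constructor
        · rintro ⟨_, _, hv⟩; exact Or.inl ⟨hq1, hq2, hv⟩
        · rintro (⟨_, _, hv⟩ | ⟨_, h2⟩)
          · exact ⟨hq1, hq2, hv⟩
          · exact absurd h2 hqc
    · have hqrn : qr.toNat ≠ r.toNat := by omega
      simp only [pvVtrue, pvVSet, pvVGet]
      rw [pvGetDSetNe _ _ _ _ _ (fun hh => hqrn hh.symm)]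
      simp only [Prod.mk.injEq]
      constructor
      · rintro ⟨_, _, hv⟩; exact Or.inl ⟨hq1, hq2, hv⟩
      · rintro (⟨_, _, hv⟩ | ⟨h1, _⟩)
        · exact ⟨hq1, hq2, hv⟩
        · exact absurd h1 hqr
  · constructor
    · rintro ⟨h1, h2, _⟩; exact absurd ⟨h1, h2⟩ hq
    · rintro (⟨h1, h2, _⟩ | hh)
      · exact absurd ⟨h1, h2⟩ hq
      · cases hh; exact absurd ⟨hr0, hc0⟩ hq

theorem pvCountSetTrue : ∀ (row : List Bool) (n : Nat) (hn : n < row.length),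
    row[n]'hn = false → (row.set n true).count false < row.count false := by
  intro row
  induction row with
  | nil => intro n hn; simp at hn
  | cons b t ih =>
    intro n hn hv
    cases n with
    | zero =>
      simp only [List.getElem_cons_zero] at hv
      subst hv
      simp
    | succ m =>
      simp only [List.getElem_cons_succ] at hv
      have := ih m (by simpa using hn) hv
      rw [List.set_cons_succ]
      simp only [List.count_cons]
      omega

theorem pvSumSetLt : ∀ (V : List (List Bool)) (n : Nat) (row' : List Bool)
    (hn : n < V.length), row'.count false < (V[n]'hn).count false →
    ((V.set n row').map (fun r => r.count false)).sum <
      (V.map (fun r => r.count false)).sum := by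
  intro V
  induction V with
  | nil => intro n row' hn; simp at hn
  | cons h t ih =>
    intro n row' hn hlt
    cases n with
    | zero =>
      simp only [List.getElem_cons_zero] at hlt
      rw [List.set_cons_zero]
      simp only [List.map_cons, List.sum_cons]
      omega
    | succ m =>
      simp only [List.getElem_cons_succ] at hlt
      have := ih m row' (by simpa using hn) hlt
      rw [List.set_cons_succ]
      simp only [List.map_cons, List.sum_cons]
      omega

theorem pvCF_vset (rows cols : Int) (V : List (List Bool)) (r c : Int)
    (h : pvShape rows cols V) (hr0 : 0 ≤ r) (hr : r < rows) (hc0 : 0 ≤ c) (hc : c < cols)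
    (hf : pvVGet V r c = false) : pvCF (pvVSet V r c) < pvCF V := by
  obtain ⟨hlen, hrow⟩ := h
  have hb : r.toNat < V.length := by omega
  have hrowlen : (V.getD r.toNat []).length = cols.toNat := by
    rw [List.getD_eq_getElem _ _ hb]; exact hrow _ (List.getElem_mem _)
  have hcb : c.toNat < (V.getD r.toNat []).length := by omega
  have hcell : (V.getD r.toNat [])[c.toNat]'hcb = false := by
    have := hf
    rw [pvVGet, List.getD_eq_getElem _ _ hcb] at this
    exact this
  have hcount : ((V.getD r.toNat []).set c.toNat true).count false <
      (V.getD r.toNat []).count false :=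
    pvCountSetTrue (V.getD r.toNat []) c.toNat hcb hcell
  rw [pvVSet]
  rw [List.getD_eq_getElem _ _ hb] at hcount ⊢
  exact pvSumSetLt V r.toNat _ hb hcount

theorem pvCF_le (rows cols : Int) (V : List (List Bool)) (h : pvShape rows cols V) :
    pvCF V ≤ rows.toNat * cols.toNat := by
  obtain ⟨hlen, hrow⟩ := h
  calc pvCF V ≤ (V.map (fun _ => cols.toNat)).sum := by
        apply List.sum_le_sum
        intro row hr
        rw [← hrow row hr]
        exact List.count_le_length
    _ = V.length * cols.toNat := by
        rw [List.map_const', List.sum_replicate, smul_eq_mul]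
    _ = rows.toNat * cols.toNat := by rw [hlen]

theorem pvVtrue_replicate (rows cols : Int) (p : Int × Int) :
    ¬ pvVtrue (List.replicate rows.toNat (List.replicate cols.toNat false)) p := by
  rintro ⟨_, _, h3⟩
  rw [pvVGet] at h3
  have hinner : (List.replicate rows.toNat (List.replicate cols.toNat false)).getD p.1.toNat []
      = [] ∨ (List.replicate rows.toNat (List.replicate cols.toNat false)).getD p.1.toNat []
      = List.replicate cols.toNat false := by
    by_cases hb : p.1.toNat < rows.toNat
    · right; rw [List.getD_eq_getElem _ _ (by simpa using hb), List.getElem_replicate]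
    · left; exact List.getD_eq_default _ _ (by simpa using Nat.le_of_not_lt hb)
  rcases hinner with hin | hin <;> rw [hin] at h3
  · simp at h3
  · by_cases hc : p.2.toNat < cols.toNat
    · rw [List.getD_eq_getElem _ _ (by simpa using hc), List.getElem_replicate] at h3
      exact Bool.false_ne_true h3
    · rw [List.getD_eq_default _ _ (by simpa using Nat.le_of_not_lt hc)] at h3
      exact Bool.false_ne_true h3

theorem pvShape_replicate (rows cols : Int) :
    pvShape rows cols (List.replicate rows.toNat (List.replicate cols.toNat false)) := by
  refine ⟨by simp, ?_⟩
  intro row hrow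
  rw [List.eq_of_mem_replicate hrow]
  simp

-- ---- reachability lemmas ----

theorem pvAdj_symm (p q : Int × Int) (h : pvAdj p q) : pvAdj q p := by
  obtain ⟨a, b⟩ := p
  obtain ⟨c, d⟩ := q
  simp only [pvAdj, pvNbrList, List.mem_cons, Prod.mk.injEq,
    List.not_mem_nil, or_false] at h ⊢
  omega

theorem pvReach_congr (grid : List (List Int)) (rows cols color : Int)
    (V V' : Int × Int → Prop) (hV : ∀ x, V x ↔ V' x) (s p : Int × Int)
    (h : pvReach grid rows cols color V s p) : pvReach grid rows cols color V' s p := by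
  induction h with
  | refl p hok hv => exact .refl p hok (fun h' => hv ((hV p).mpr h'))
  | step p q r hok hv ha _ ih => exact .step p q r hok (fun h' => hv ((hV p).mpr h')) ha ih

theorem pvReach_mono (grid : List (List Int)) (rows cols color : Int)
    (V V' : Int × Int → Prop) (hV : ∀ x, V x → V' x) (s p : Int × Int)
    (h : pvReach grid rows cols color V' s p) : pvReach grid rows cols color V s p := by
  induction h with
  | refl p hok hv => exact .refl p hok (fun h' => hv (hV p h'))
  | step p q r hok hv ha _ ih => exact .step p q r hok (fun h' => hv (hV p h')) ha ih

theorem pvReach_first (grid : List (List Int)) (rows cols color : Int)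
    (V : Int × Int → Prop) (s p : Int × Int) (h : pvReach grid rows cols color V s p) :
    pvOk grid rows cols color s ∧ ¬V s := by
  cases h with
  | refl p hok hv => exact ⟨hok, hv⟩
  | step p q r hok hv _ _ => exact ⟨hok, hv⟩

theorem pvReach_last (grid : List (List Int)) (rows cols color : Int)
    (V : Int × Int → Prop) (s p : Int × Int) (h : pvReach grid rows cols color V s p) :
    pvOk grid rows cols color p ∧ ¬V p := by
  induction h with
  | refl p hok hv => exact ⟨hok, hv⟩
  | step _ _ _ _ _ _ _ ih => exact ih

theorem pvReach_snoc (grid : List (List Int)) (rows cols color : Int)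
    (V : Int × Int → Prop) (s p q : Int × Int) (h : pvReach grid rows cols color V s p)
    (ha : pvAdj p q) (hq : pvOk grid rows cols color q) (hv : ¬V q) :
    pvReach grid rows cols color V s q := by
  induction h with
  | refl p hok hv' => exact .step p q q hok hv' ha (.refl q hq hv)
  | step a b c hok hv' ha' _ ih => exact .step a b q hok hv' ha' (ih ha)

theorem pvComp_symm (grid : List (List Int)) (rows cols color : Int) (s p : Int × Int)
    (h : pvComp grid rows cols color s p) : pvComp grid rows cols color p s := by
  induction h with
  | refl p hok hv => exact .refl p hok hv
  | step p q r hok hv ha _ ih =>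
    exact pvReach_snoc grid rows cols color _ r q p ih (pvAdj_symm p q ha) hok not_false

theorem pvComp_trans (grid : List (List Int)) (rows cols color : Int) (s p q : Int × Int)
    (h1 : pvComp grid rows cols color s p) (h2 : pvComp grid rows cols color p q) :
    pvComp grid rows cols color s q := by
  revert h2
  induction h1 with
  | refl _ _ _ => exact fun h2 => h2
  | step a b c hok hv ha _ ih => exact fun h2 => .step a b q hok hv ha (ih h2)

-- restriction: if the component avoids V, reach-avoiding-V is the whole component
theorem pvReach_of_comp (grid : List (List Int)) (rows cols color : Int)
    (V : Int × Int → Prop) (s p : Int × Int)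
    (hdis : ∀ x, pvComp grid rows cols color s x → ¬V x)
    (h : pvComp grid rows cols color s p) : pvReach grid rows cols color V s p := by
  revert hdis
  induction h with
  | refl p hok _ =>
    exact fun hdis => .refl p hok (hdis p (.refl p hok not_false))
  | step p q r hok _ ha hsub ih =>
    intro hdis
    have hokq := (pvReach_first grid rows cols color _ q r hsub).1
    have hpq : pvComp grid rows cols color p q :=
      .step p q q hok not_false ha (.refl q hokq not_false)
    exact .step p q r hok (hdis p (.refl p hok not_false)) ha
      (ih (fun x hx => hdis x (pvComp_trans grid rows cols color p q x hpq hx)))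

-- peeling one visited cell off: the key DFS step
theorem pvReach_peel (grid : List (List Int)) (rows cols color : Int)
    (V : Int × Int → Prop) (x s p : Int × Int)
    (h : pvReach grid rows cols color V s p) :
    p = x ∨ pvReach grid rows cols color (fun y => V y ∨ y = x) s p ∨
      ∃ q, pvAdj x q ∧ pvReach grid rows cols color (fun y => V y ∨ y = x) q p := by
  induction h with
  | refl p hok hv =>
    by_cases hpx : p = x
    · exact Or.inl hpx
    · exact Or.inr (Or.inl (.refl p hok (by rintro (h' | h') <;> [exact hv h'; exact hpx h'])))
  | step p q r hok hv ha hsub ih =>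
    rcases ih with hrx | h2 | ⟨q', hq', h3⟩
    · exact Or.inl hrx
    · by_cases hpx : p = x
      · subst hpx
        exact Or.inr (Or.inr ⟨q, ha, h2⟩)
      · exact Or.inr (Or.inl (.step p q r hok
          (by rintro (h' | h') <;> [exact hv h'; exact hpx h']) ha h2))
    · exact Or.inr (Or.inr ⟨q', hq', h3⟩)

theorem pvKeyStep (grid : List (List Int)) (rows cols color : Int)
    (V : Int × Int → Prop) (x : Int × Int) (S : List (Int × Int))
    (hx : pvOk grid rows cols color x) (hv : ¬V x) (p : Int × Int) :
    (V p ∨ ∃ s ∈ x :: S, pvReach grid rows cols color V s p) ↔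
      ((V p ∨ p = x) ∨ ∃ s ∈ pvNbrList x ++ S,
        pvReach grid rows cols color (fun y => V y ∨ y = x) s p) := by
  constructor
  · rintro (hVp | ⟨s, hs, hsp⟩)
    · exact Or.inl (Or.inl hVp)
    · rcases pvReach_peel grid rows cols color V x s p hsp with rfl | h2 | ⟨q, hq, h3⟩
      · exact Or.inl (Or.inr rfl)
      · rcases List.mem_cons.mp hs with rfl | hS
        · exact absurd (Or.inr rfl) (pvReach_first grid rows cols color _ s p h2).2
        · exact Or.inr ⟨s, List.mem_append_right _ hS, h2⟩
      · exact Or.inr ⟨q, List.mem_append_left _ hq, h3⟩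
  · rintro ((hVp | rfl) | ⟨s, hs, hsp⟩)
    · exact Or.inl hVp
    · exact Or.inr ⟨p, List.mem_cons_self, .refl p hx hv⟩
    · have hsp' : pvReach grid rows cols color V s p :=
        pvReach_mono grid rows cols color V _ (fun y hy => Or.inl hy) s p hsp
      rcases List.mem_append.mp hs with hnb | hS
      · exact Or.inr ⟨x, List.mem_cons_self, .step x s p hx hv hnb hsp'⟩
      · exact Or.inr ⟨s, List.mem_cons_of_mem _ hS, hsp'⟩

-- ---- A's flood fill computes reach ----

theorem pvFillA_spec (grid : List (List Int)) (rows cols color : Int) :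
    ∀ (f : Nat) (S : List (Int × Int)) (V : List (List Bool)) (C : List (Int × Int)),
      pvShape rows cols V → S.length + 5 * pvCF V ≤ f →
      pvShape rows cols (pvFillA grid rows cols color f S V C).1 ∧
      (∀ p, pvVtrue (pvFillA grid rows cols color f S V C).1 p ↔
        (pvVtrue V p ∨ ∃ s ∈ S, pvReach grid rows cols color (pvVtrue V) s p)) ∧
      ∃ Δ, (pvFillA grid rows cols color f S V C).2 = C ++ Δ ∧ Δ.Nodup ∧
        ∀ p, p ∈ Δ ↔ (pvVtrue (pvFillA grid rows cols color f S V C).1 p ∧ ¬pvVtrue V p) := by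
  intro f
  induction f with
  | zero =>
    intro S V C hsh hfuel
    have hS : S = [] := List.length_eq_zero_iff.mp (by omega)
    subst hS
    simp only [pvFillA]
    exact ⟨hsh, fun p => by simp, [], by simp, List.nodup_nil, fun p => by simp⟩
  | succ f ih =>
    intro S V C hsh hfuel
    match S with
    | [] =>
      simp only [pvFillA]
      exact ⟨hsh, fun p => by simp, [], by simp, List.nodup_nil, fun p => by simp⟩
    | (cr, cc) :: S' =>
      by_cases hb : cr < 0 ∨ rows ≤ cr ∨ cc < 0 ∨ cols ≤ cc
      · -- out of bounds: skip
        have hred : pvFillA grid rows cols color (f + 1) ((cr, cc) :: S') V C =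
            pvFillA grid rows cols color f S' V C := by
          simp only [pvFillA]
          rw [if_pos hb]
        rw [hred]
        obtain ⟨h1, h2, h3⟩ := ih S' V C hsh (by simp at hfuel ⊢; omega)
        have hnx : ∀ p, ¬ pvReach grid rows cols color (pvVtrue V) (cr, cc) p := by
          intro p hr
          obtain ⟨⟨o1, o2, o3, o4, _⟩, _⟩ := pvReach_first grid rows cols color _ _ _ hr
          simp only at o1 o2 o3 o4
          omega
        refine ⟨h1, fun p => (h2 p).trans (or_congr_right ?_), h3⟩
        constructor
        · rintro ⟨s, hs, hr⟩; exact ⟨s, List.mem_cons_of_mem _ hs, hr⟩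
        · rintro ⟨s, hs, hr⟩
          rcases List.mem_cons.mp hs with rfl | hS'
          · exact absurd hr (hnx p)
          · exact ⟨s, hS', hr⟩
      · push Not at hb
        obtain ⟨hb1, hb2, hb3, hb4⟩ := hb
        by_cases hv : pvVGet V cr cc = true ∨ pvGGet grid cr cc ≠ color
        · -- visited or wrong colour: skip
          have hred : pvFillA grid rows cols color (f + 1) ((cr, cc) :: S') V C =
              pvFillA grid rows cols color f S' V C := by
            simp only [pvFillA]
            rw [if_neg (by omega), if_pos hv]
          rw [hred]
          obtain ⟨h1, h2, h3⟩ := ih S' V C hsh (by simp at hfuel ⊢; omega)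
          have hnx : ∀ p, ¬ pvReach grid rows cols color (pvVtrue V) (cr, cc) p := by
            intro p hr
            obtain ⟨⟨_, _, _, _, o5⟩, hnv⟩ := pvReach_first grid rows cols color _ _ _ hr
            rcases hv with hv | hv
            · exact hnv ⟨hb1, hb3, hv⟩
            · exact hv o5
          refine ⟨h1, fun p => (h2 p).trans (or_congr_right ?_), h3⟩
          constructor
          · rintro ⟨s, hs, hr⟩; exact ⟨s, List.mem_cons_of_mem _ hs, hr⟩
          · rintro ⟨s, hs, hr⟩
            rcases List.mem_cons.mp hs with rfl | hS'
            · exact absurd hr (hnx p)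
            · exact ⟨s, hS', hr⟩
        · -- fresh cell of the right colour: visit it
          push Not at hv
          obtain ⟨hnv, hcol⟩ := hv
          have hnv' : pvVGet V cr cc = false := by
            cases hgv : pvVGet V cr cc
            · rfl
            · exact absurd hgv hnv
          have hred : pvFillA grid rows cols color (f + 1) ((cr, cc) :: S') V C =
              pvFillA grid rows cols color f
                ((cr, cc + 1) :: (cr, cc - 1) :: (cr + 1, cc) :: (cr - 1, cc) :: S')
                (pvVSet V cr cc) (C ++ [(cr, cc)]) := by
            simp only [pvFillA]
            rw [if_neg (by omega), if_neg (by push Not; exact ⟨hnv, hcol⟩)]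
          rw [hred]
          have hsh2 : pvShape rows cols (pvVSet V cr cc) := pvShape_vset rows cols V cr cc hsh
          have hcf : pvCF (pvVSet V cr cc) < pvCF V :=
            pvCF_vset rows cols V cr cc hsh hb1 hb2 hb3 hb4 hnv'
          obtain ⟨h1, h2, Δ, hΔeq, hΔnd, hΔmem⟩ :=
            ih ((cr, cc + 1) :: (cr, cc - 1) :: (cr + 1, cc) :: (cr - 1, cc) :: S')
              (pvVSet V cr cc) (C ++ [(cr, cc)]) hsh2 (by simp at hfuel ⊢; omega)
          have hcongr : ∀ q, pvVtrue (pvVSet V cr cc) q ↔ (pvVtrue V q ∨ q = (cr, cc)) :=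
            pvVtrue_vset rows cols V cr cc hsh hb1 hb2 hb3 hb4
          have hx : pvOk grid rows cols color (cr, cc) := ⟨hb1, hb2, hb3, hb4, hcol⟩
          have hvx : ¬ pvVtrue V (cr, cc) := by
            rintro ⟨_, _, hg⟩
            rw [hnv'] at hg
            exact Bool.false_ne_true hg
          have hvx2 : pvVtrue (pvVSet V cr cc) (cr, cc) := (hcongr _).mpr (Or.inr rfl)
          have hmemiff : ∀ t : Int × Int,
              t ∈ ((cr, cc + 1) :: (cr, cc - 1) :: (cr + 1, cc) :: (cr - 1, cc) :: S') ↔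
              t ∈ pvNbrList (cr, cc) ++ S' := by
            intro t
            simp only [pvNbrList, List.mem_cons, List.mem_append]
            tauto
          have hiff : ∀ p, pvVtrue (pvFillA grid rows cols color f
              ((cr, cc + 1) :: (cr, cc - 1) :: (cr + 1, cc) :: (cr - 1, cc) :: S')
              (pvVSet V cr cc) (C ++ [(cr, cc)])).1 p ↔
              (pvVtrue V p ∨ ∃ s ∈ (cr, cc) :: S',
                pvReach grid rows cols color (pvVtrue V) s p) := by
            intro p
            rw [h2 p]
            rw [pvKeyStep grid rows cols color (pvVtrue V) (cr, cc) S' hx hvx p]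
            apply or_congr (hcongr p)
            constructor
            · rintro ⟨t, ht, hr⟩
              exact ⟨t, (hmemiff t).mp ht,
                pvReach_congr grid rows cols color _ _ hcongr t p hr⟩
            · rintro ⟨t, ht, hr⟩
              exact ⟨t, (hmemiff t).mpr ht,
                pvReach_congr grid rows cols color _ _ (fun y => (hcongr y).symm) t p hr⟩
          refine ⟨h1, hiff, (cr, cc) :: Δ, by simpa using hΔeq, ?_, ?_⟩
          · refine List.Nodup.cons ?_ hΔnd
            intro hmem
            exact ((hΔmem _).mp hmem).2 hvx2
          · intro p
            constructor
            · rintro hp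
              rcases List.mem_cons.mp hp with rfl | hpΔ
              · exact ⟨(h2 (cr, cc)).mpr (Or.inl hvx2), hvx⟩
              · obtain ⟨hres, hnV2⟩ := (hΔmem p).mp hpΔ
                exact ⟨hres, fun hVp => hnV2 ((hcongr p).mpr (Or.inl hVp))⟩
            · rintro ⟨hres, hnVp⟩
              by_cases hpx : p = (cr, cc)
              · exact List.mem_cons.mpr (Or.inl hpx)
              · refine List.mem_cons.mpr (Or.inr ((hΔmem p).mpr ⟨hres, ?_⟩))
                intro hV2
                rcases (hcongr p).mp hV2 with hVp | hpx'
                · exact hnVp hVp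
                · exact hpx hpx'

-- ---- B's saturation computes the component ----

theorem pvStepB_mem (grid : List (List Int)) (rows cols color : Int)
    (comp nxt : PySem.Set (Int × Int)) (t q : Int × Int) :
    q ∈ pvStepB grid rows cols color comp nxt t ↔
      q ∈ nxt ∨ (q = t ∧ q ∉ comp ∧ pvOk grid rows cols color q) := by
  unfold pvStepB
  split_ifs with hcond
  · rw [PySem.Set.mem_add]
    constructor
    · rintro (h | rfl)
      · exact Or.inl h
      · obtain ⟨c1, c2, c3, c4, c5, c6⟩ := hcond
        exact Or.inr ⟨rfl, fun hm => c5 ((PySem.Set.contains_iff comp q).mpr hm),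
          ⟨c1, c2, c3, c4, c6⟩⟩
    · rintro (h | ⟨rfl, _, _⟩)
      · exact Or.inl h
      · exact Or.inr rfl
  · constructor
    · exact Or.inl
    · rintro (h | ⟨rfl, hnc, ⟨c1, c2, c3, c4, c6⟩⟩)
      · exact h
      · exact absurd ⟨c1, c2, c3, c4,
          fun hct => hnc ((PySem.Set.contains_iff comp q).mp hct), c6⟩ hcond

theorem pvNbrFold_mem (grid : List (List Int)) (rows cols color : Int)
    (comp nxt : PySem.Set (Int × Int)) (p q : Int × Int) :
    q ∈ (pvNbrList p).foldl (pvStepB grid rows cols color comp) nxt ↔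
      q ∈ nxt ∨ (pvAdj p q ∧ q ∉ comp ∧ pvOk grid rows cols color q) := by
  simp only [pvNbrList, List.foldl_cons, List.foldl_nil, pvStepB_mem, pvAdj, pvNbrList,
    List.mem_cons, List.not_mem_nil, or_false]
  tauto

theorem pvNextB_mem (grid : List (List Int)) (rows cols color : Int)
    (comp : PySem.Set (Int × Int)) (frontier : List (Int × Int)) (q : Int × Int) :
    q ∈ pvNextB grid rows cols color comp frontier ↔
      (∃ p ∈ frontier, pvAdj p q) ∧ q ∉ comp ∧ pvOk grid rows cols color q := by
  have main : ∀ (fr : List (Int × Int)) (acc : PySem.Set (Int × Int)),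
      q ∈ fr.foldl (fun nxt p => (pvNbrList p).foldl (pvStepB grid rows cols color comp) nxt) acc ↔
      q ∈ acc ∨ ((∃ p ∈ fr, pvAdj p q) ∧ q ∉ comp ∧ pvOk grid rows cols color q) := by
    intro fr
    induction fr with
    | nil => intro acc; simp
    | cons p fr ihf =>
      intro acc
      rw [List.foldl_cons, ihf, pvNbrFold_mem]
      constructor
      · rintro ((h | ⟨ha, h2, h3⟩) | ⟨⟨t, ht, ha⟩, h2, h3⟩)
        · exact Or.inl h
        · exact Or.inr ⟨⟨p, List.mem_cons_self, ha⟩, h2, h3⟩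
        · exact Or.inr ⟨⟨t, List.mem_cons_of_mem _ ht, ha⟩, h2, h3⟩
      · rintro (h | ⟨⟨t, ht, ha⟩, h2, h3⟩)
        · exact Or.inl (Or.inl h)
        · rcases List.mem_cons.mp ht with rfl | ht'
          · exact Or.inl (Or.inr ⟨ha, h2, h3⟩)
          · exact Or.inr ⟨⟨t, ht', ha⟩, h2, h3⟩
  rw [pvNextB, main]
  simp [PySem.Set.empty]

theorem pvNextB_nodup (grid : List (List Int)) (rows cols color : Int)
    (comp : PySem.Set (Int × Int)) (frontier : List (Int × Int)) :
    (pvNextB grid rows cols color comp frontier).Nodup := by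
  have hstep : ∀ (acc : PySem.Set (Int × Int)) (t : Int × Int), acc.Nodup →
      (pvStepB grid rows cols color comp acc t).Nodup := by
    intro acc t hnd
    unfold pvStepB
    split_ifs
    · exact PySem.Set.nodup_add acc t hnd
    · exact hnd
  have hinner : ∀ (l : List (Int × Int)) (acc : PySem.Set (Int × Int)), acc.Nodup →
      (l.foldl (pvStepB grid rows cols color comp) acc).Nodup := by
    intro l
    induction l with
    | nil => exact fun acc h => h
    | cons t l ihl => exact fun acc h => ihl _ (hstep acc t h)
  have houter : ∀ (fr : List (Int × Int)) (acc : PySem.Set (Int × Int)), acc.Nodup →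
      (fr.foldl (fun nxt p => (pvNbrList p).foldl (pvStepB grid rows cols color comp) nxt)
        acc).Nodup := by
    intro fr
    induction fr with
    | nil => exact fun acc h => h
    | cons p fr ihf => exact fun acc h => ihf _ (hinner _ acc h)
  exact houter frontier PySem.Set.empty List.nodup_nil

def pvAllCells (rows cols : Int) : List (Int × Int) :=
  (List.range rows.toNat).flatMap fun (a : Nat) =>
    (List.range cols.toNat).map fun (b : Nat) => ((a : Int), (b : Int))

def pvRemain (rows cols : Int) (comp : List (Int × Int)) : Nat :=
  (pvAllCells rows cols).countP fun p => !(PySem.Set.contains comp p)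

theorem pvMemAllCells (rows cols : Int) (q : Int × Int) :
    q ∈ pvAllCells rows cols ↔ 0 ≤ q.1 ∧ q.1 < rows ∧ 0 ≤ q.2 ∧ q.2 < cols := by
  obtain ⟨a, b⟩ := q
  constructor
  · intro h
    rw [pvAllCells, List.mem_flatMap] at h
    obtain ⟨x, hx, hmem⟩ := h
    rw [List.mem_map] at hmem
    obtain ⟨y, hy, heq⟩ := hmem
    rw [List.mem_range] at hx
    rw [List.mem_range] at hy
    cases heq
    simp only
    omega
  · rintro ⟨h1, h2, h3, h4⟩
    rw [pvAllCells, List.mem_flatMap]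
    refine ⟨a.toNat, List.mem_range.mpr (by omega),
      List.mem_map.mpr ⟨b.toNat, List.mem_range.mpr (by omega), ?_⟩⟩
    simp only [Prod.mk.injEq]
    omega

theorem pvLengthAllCells (rows cols : Int) :
    (pvAllCells rows cols).length = rows.toNat * cols.toNat := by
  rw [pvAllCells, List.length_flatMap]
  simp

theorem pvCountPLt {α : Type} (l : List α) (p p' : α → Bool)
    (hmono : ∀ a, p' a = true → p a = true) (x : α) (hx : x ∈ l) (hpx : p x = true)
    (hpx' : p' x = false) : l.countP p' < l.countP p := by
  induction l with
  | nil => simp at hx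
  | cons a t iht =>
    have hmle : t.countP p' ≤ t.countP p := List.countP_mono_left (fun a _ => hmono a)
    rcases List.mem_cons.mp hx with rfl | hxt
    · have e1 : (if p' x = true then 1 else 0) = 0 := by simp [hpx']
      have e2 : (if p x = true then 1 else 0) = 1 := by simp [hpx]
      rw [List.countP_cons, List.countP_cons, e1, e2]
      omega
    · have hstrict := iht hxt
      have hib : (if p' a = true then 1 else 0) ≤ (if p a = true then 1 else 0) := by
        by_cases hpa : p' a = true
        · simp [hpa, hmono a hpa]
        · simp [hpa]
      rw [List.countP_cons, List.countP_cons]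
      omega

theorem pvRemain_lt (rows cols : Int) (comp comp' : List (Int × Int))
    (hsub : ∀ a, a ∈ comp → a ∈ comp') (x : Int × Int)
    (hxr : 0 ≤ x.1 ∧ x.1 < rows ∧ 0 ≤ x.2 ∧ x.2 < cols) (hxn : x ∉ comp) (hxm : x ∈ comp') :
    pvRemain rows cols comp' < pvRemain rows cols comp := by
  unfold pvRemain
  apply pvCountPLt (pvAllCells rows cols) _ _ ?_ x ((pvMemAllCells rows cols x).mpr hxr) ?_ ?_
  · intro a ha
    rw [Bool.not_eq_true'] at ha ⊢
    cases hc : PySem.Set.contains comp a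
    · rfl
    · have hmem := (PySem.Set.contains_iff comp' a).mpr
        (hsub a ((PySem.Set.contains_iff comp a).mp hc))
      rw [ha] at hmem
      exact absurd hmem Bool.false_ne_true
  · rw [Bool.not_eq_true']
    cases hc : PySem.Set.contains comp x
    · rfl
    · exact absurd ((PySem.Set.contains_iff comp x).mp hc) hxn
  · have hct : PySem.Set.contains comp' x = true := (PySem.Set.contains_iff comp' x).mpr hxm
    rw [hct]
    rfl

theorem pvRemain_le (rows cols : Int) (comp : List (Int × Int)) :
    pvRemain rows cols comp ≤ rows.toNat * cols.toNat := by
  rw [pvRemain, ← pvLengthAllCells rows cols]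
  exact List.countP_le_length

theorem pvClosed_comp (grid : List (List Int)) (rows cols color : Int)
    (comp : List (Int × Int))
    (hclosed : ∀ p ∈ comp, ∀ q, pvAdj p q → pvOk grid rows cols color q → q ∈ comp) :
    ∀ a p, pvComp grid rows cols color a p → a ∈ comp → p ∈ comp := by
  intro a p h
  induction h with
  | refl _ _ _ => exact id
  | step p q r hok _ ha hsub ih =>
    intro hp
    have hokq := (pvReach_first grid rows cols color _ q r hsub).1
    exact ih (hclosed p hp q ha hokq)

theorem pvGrowB_spec (grid : List (List Int)) (rows cols color : Int) (s : Int × Int) :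
    ∀ (f : Nat) (comp : PySem.Set (Int × Int)) (frontier : List (Int × Int)),
      comp.Nodup → s ∈ comp →
      (∀ p ∈ comp, pvComp grid rows cols color s p) →
      (∀ p ∈ frontier, p ∈ comp) →
      (∀ p ∈ comp, ∀ q, pvAdj p q → pvOk grid rows cols color q → q ∈ comp ∨ p ∈ frontier) →
      pvRemain rows cols comp + 1 ≤ f →
      (pvGrowB grid rows cols color f comp frontier).Nodup ∧
        ∀ p, p ∈ pvGrowB grid rows cols color f comp frontier ↔ pvComp grid rows cols color s p := by
  intro f
  induction f with
  | zero =>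
    intro comp frontier _ _ _ _ _ hfuel
    omega
  | succ f ih =>
    intro comp frontier hnd hs hcomp hfr hcl hfuel
    by_cases hfe : frontier.isEmpty
    · -- frontier exhausted: comp is closed, hence exactly the component
      rw [pvGrowB, if_pos hfe]
      have hfr0 : frontier = [] := List.isEmpty_iff.mp hfe
      subst hfr0
      have hclosed : ∀ p ∈ comp, ∀ q, pvAdj p q → pvOk grid rows cols color q → q ∈ comp := by
        intro p hp q ha hok
        rcases hcl p hp q ha hok with h | h
        · exact h
        · simp at h
      refine ⟨hnd, fun p => ⟨fun hp => hcomp p hp, fun hr => ?_⟩⟩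
      exact pvClosed_comp grid rows cols color comp hclosed s p hr hs
    · rw [pvGrowB, if_neg hfe]
      by_cases hnx : pvNextB grid rows cols color comp frontier = []
      · -- no fresh neighbours: already closed
        rw [hnx]
        have hres : pvGrowB grid rows cols color f (PySem.Set.union comp []) [] = comp := by
          have hu : PySem.Set.union comp ([] : List (Int × Int)) = comp := rfl
          rw [hu]
          cases f <;> simp [pvGrowB]
        rw [hres]
        have hclosed : ∀ p ∈ comp, ∀ q, pvAdj p q → pvOk grid rows cols color q → q ∈ comp := by
          intro p hp q ha hok
          rcases hcl p hp q ha hok with h | h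
          · exact h
          · by_cases hqc : q ∈ comp
            · exact hqc
            · have : q ∈ pvNextB grid rows cols color comp frontier :=
                (pvNextB_mem grid rows cols color comp frontier q).mpr ⟨⟨p, h, ha⟩, hqc, hok⟩
              rw [hnx] at this
              simp at this
        refine ⟨hnd, fun p => ⟨fun hp => hcomp p hp, fun hr => ?_⟩⟩
        exact pvClosed_comp grid rows cols color comp hclosed s p hr hs
      · -- grow and recurse
        set nxt := pvNextB grid rows cols color comp frontier with hnxt
        have hndN : nxt.Nodup := pvNextB_nodup grid rows cols color comp frontier
        have hsubU : ∀ a, a ∈ comp → a ∈ PySem.Set.union comp nxt := fun a ha =>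
          (PySem.Set.mem_union comp nxt a).mpr (Or.inl ha)
        have hmemN : ∀ q ∈ nxt, (∃ p ∈ frontier, pvAdj p q) ∧ q ∉ comp ∧
            pvOk grid rows cols color q := fun q hq =>
          (pvNextB_mem grid rows cols color comp frontier q).mp hq
        obtain ⟨x, hx⟩ := List.exists_mem_of_ne_nil nxt hnx
        obtain ⟨⟨px, hpx, hax⟩, hxnc, hxok⟩ := hmemN x hx
        have hfuel' : pvRemain rows cols (PySem.Set.union comp nxt) + 1 ≤ f := by
          have hdec : pvRemain rows cols (PySem.Set.union comp nxt) <
              pvRemain rows cols comp := by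
            apply pvRemain_lt rows cols comp (PySem.Set.union comp nxt) hsubU x
              ⟨hxok.1, hxok.2.1, hxok.2.2.1, hxok.2.2.2.1⟩ hxnc
            exact (PySem.Set.mem_union comp nxt x).mpr (Or.inr hx)
          omega
        apply ih (PySem.Set.union comp nxt) nxt
          (PySem.Set.nodup_union comp nxt hnd) (hsubU s hs) ?_ ?_ ?_ hfuel'
        · -- every cell of the grown set lies in the component
          intro p hp
          rcases (PySem.Set.mem_union comp nxt p).mp hp with h | h
          · exact hcomp p h
          · obtain ⟨⟨t, ht, hat⟩, _, hok⟩ := hmemN p h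
            exact pvReach_snoc grid rows cols color _ s t p (hcomp t (hfr t ht)) hat hok
              not_false
        · exact fun p hp => (PySem.Set.mem_union comp nxt p).mpr (Or.inr hp)
        · -- closedness up to the new frontier
          intro p hp q ha hok
          rcases (PySem.Set.mem_union comp nxt p).mp hp with h | h
          · rcases hcl p h q ha hok with h2 | h2
            · exact Or.inl (hsubU q h2)
            · by_cases hqc : q ∈ comp
              · exact Or.inl (hsubU q hqc)
              · refine Or.inl ((PySem.Set.mem_union comp nxt q).mpr (Or.inr ?_))
                exact (pvNextB_mem grid rows cols color comp frontier q).mpr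
                  ⟨⟨p, h2, ha⟩, hqc, hok⟩
          · exact Or.inr h

-- ---- extremal values only depend on the set ----

theorem pvMinMax_perm (xs ys : List Int) (h : xs.Perm ys) :
    (PySem.List.min? xs (fun x => x)).getD 0 = (PySem.List.min? ys (fun x => x)).getD 0 ∧
    (PySem.List.max? xs (fun x => x)).getD 0 = (PySem.List.max? ys (fun x => x)).getD 0 := by
  constructor
  · rcases hx : PySem.List.min? xs (fun x => x) with _ | m1
    · have hxe : xs = [] := (PySem.List.min?_eq_none_iff xs _).mp hx
      subst hxe
      have hye : ys = [] := h.symm.eq_nil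
      subst hye
      rfl
    · rcases hy : PySem.List.min? ys (fun x => x) with _ | m2
      · have hye : ys = [] := (PySem.List.min?_eq_none_iff ys _).mp hy
        subst hye
        have hxe : xs = [] := h.eq_nil
        subst hxe
        rw [(PySem.List.min?_eq_none_iff ([] : List Int) (fun x => x)).mpr rfl] at hx
        cases hx
      · simp only [Option.getD_some]
        exact le_antisymm (PySem.List.min?_isMin hx m2 (h.mem_iff.mpr (PySem.List.min?_mem hy)))
          (PySem.List.min?_isMin hy m1 (h.mem_iff.mp (PySem.List.min?_mem hx)))
  · rcases hx : PySem.List.max? xs (fun x => x) with _ | m1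
    · have hxe : xs = [] := (PySem.List.max?_eq_none_iff xs _).mp hx
      subst hxe
      have hye : ys = [] := h.symm.eq_nil
      subst hye
      rfl
    · rcases hy : PySem.List.max? ys (fun x => x) with _ | m2
      · have hye : ys = [] := (PySem.List.max?_eq_none_iff ys _).mp hy
        subst hye
        have hxe : xs = [] := h.eq_nil
        subst hxe
        rw [(PySem.List.max?_eq_none_iff ([] : List Int) (fun x => x)).mpr rfl] at hx
        cases hx
      · simp only [Option.getD_some]
        exact le_antisymm (PySem.List.max?_isMax hy m1 (h.mem_iff.mp (PySem.List.max?_mem hx)))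
          (PySem.List.max?_isMax hx m2 (h.mem_iff.mpr (PySem.List.max?_mem hy)))

-- ---- the joint invariant and the lockstep simulation ----

def pvInv (grid : List (List Int)) (rows cols : Int) (V : List (List Bool))
    (seen : PySem.Set (Int × Int)) : Prop :=
  pvShape rows cols V ∧ seen.Nodup ∧ (∀ p, pvVtrue V p ↔ p ∈ seen) ∧
  ∀ p q, pvVtrue V p → pvComp grid rows cols (pvGGet grid p.1 p.2) p q → pvVtrue V q

theorem pvCols_lockstep (grid : List (List Int)) (rows cols r : Int)
    (hr0 : 0 ≤ r) (hr : r < rows) :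
    ∀ (cs : List Int) (V : List (List Bool)) (seen : PySem.Set (Int × Int)),
      (∀ c ∈ cs, 0 ≤ c ∧ c < cols) → pvInv grid rows cols V seen →
      (∃ ans, pvColsA grid rows cols r cs V = Sum.inl ans ∧
              pvColsB grid rows cols r cs seen = Sum.inl ans) ∨
      (∃ V' seen', pvColsA grid rows cols r cs V = Sum.inr V' ∧
              pvColsB grid rows cols r cs seen = Sum.inr seen' ∧
              pvInv grid rows cols V' seen') := by
  intro cs
  induction cs with
  | nil => intro V seen _ hinv; exact Or.inr ⟨V, seen, rfl, rfl, hinv⟩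
  | cons c cs ihc =>
    intro V seen hcs hinv
    obtain ⟨hsh, hnd, hcorr, hginv⟩ := hinv
    obtain ⟨hc0, hcC⟩ := hcs c List.mem_cons_self
    have hcs' := fun x hx => hcs x (List.mem_cons_of_mem _ hx)
    have hguard : (pvVGet V r c = true) ↔ (PySem.Set.contains seen (r, c) = true) := by
      rw [PySem.Set.contains_iff]
      constructor
      · intro hv; exact (hcorr (r, c)).mp ⟨hr0, hc0, hv⟩
      · intro hm; exact ((hcorr (r, c)).mpr hm).2.2
    by_cases hfire : pvGGet grid r c ≠ 0 ∧ ¬(pvVGet V r c = true)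
    · obtain ⟨hcol0, hnvis⟩ := hfire
      have hfireB : pvGGet grid r c ≠ 0 ∧ ¬(PySem.Set.contains seen (r, c) = true) :=
        ⟨hcol0, fun hct => hnvis (hguard.mpr hct)⟩
      have hfuel : ([((r : Int), (c : Int))] : List (Int × Int)).length + 5 * pvCF V ≤
          5 * (rows.toNat * cols.toNat) + 1 := by
        have := pvCF_le rows cols V hsh
        simp only [List.length_cons, List.length_nil]
        omega
      obtain ⟨hshA, hiffA, Δ, hcells, hΔnd, hΔmem⟩ :=
        pvFillA_spec grid rows cols (pvGGet grid r c) (5 * (rows.toNat * cols.toNat) + 1)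
          [(r, c)] V [] hsh hfuel
      have hOks : pvOk grid rows cols (pvGGet grid r c) (r, c) := ⟨hr0, hr, hc0, hcC, rfl⟩
      have hnvtrue : ¬ pvVtrue V (r, c) := fun hv => hnvis hv.2.2
      have hdisj : ∀ x, pvComp grid rows cols (pvGGet grid r c) (r, c) x → ¬ pvVtrue V x := by
        intro x hx hvx
        have hokx := (pvReach_last grid rows cols (pvGGet grid r c) _ _ _ hx).1
        have hxs : pvComp grid rows cols (pvGGet grid r c) x (r, c) :=
          pvComp_symm grid rows cols (pvGGet grid r c) _ _ hx
        have hxs' : pvComp grid rows cols (pvGGet grid x.1 x.2) x (r, c) := by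
          rw [hokx.2.2.2.2]; exact hxs
        exact hnvtrue (hginv x (r, c) hvx hxs')
      have hreach_iff : ∀ p, pvReach grid rows cols (pvGGet grid r c) (pvVtrue V) (r, c) p ↔
          pvComp grid rows cols (pvGGet grid r c) (r, c) p := by
        intro p
        constructor
        · exact fun hr' => pvReach_mono grid rows cols (pvGGet grid r c) (fun _ => False)
            (pvVtrue V) (fun _ h => h.elim) (r, c) p hr'
        · exact fun hc' => pvReach_of_comp grid rows cols (pvGGet grid r c) (pvVtrue V)
            (r, c) p hdisj hc'
      have hiffA' : ∀ p, pvVtrue (pvFillA grid rows cols (pvGGet grid r c)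
          (5 * (rows.toNat * cols.toNat) + 1) [(r, c)] V []).1 p ↔
          (pvVtrue V p ∨ pvComp grid rows cols (pvGGet grid r c) (r, c) p) := by
        intro p
        rw [hiffA p]
        apply or_congr Iff.rfl
        constructor
        · rintro ⟨t, ht, hr'⟩
          rcases List.mem_cons.mp ht with rfl | ht'
          · exact (hreach_iff p).mp hr'
          · simp at ht'
        · exact fun hc' => ⟨(r, c), List.mem_cons_self, (hreach_iff p).mpr hc'⟩
      have hΔiff : ∀ p, p ∈ Δ ↔ pvComp grid rows cols (pvGGet grid r c) (r, c) p := by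
        intro p
        rw [hΔmem p]
        constructor
        · rintro ⟨hres, hnv⟩
          rcases (hiffA' p).mp hres with h | h
          · exact absurd h hnv
          · exact h
        · intro hcomp
          exact ⟨(hiffA' p).mpr (Or.inr hcomp), hdisj p hcomp⟩
      -- B side
      have hof : PySem.Set.ofList [((r : Int), (c : Int))] = [(r, c)] := rfl
      obtain ⟨hndB, hmemB⟩ := pvGrowB_spec grid rows cols (pvGGet grid r c) (r, c)
        (rows.toNat * cols.toNat + 1) (PySem.Set.ofList [(r, c)]) [(r, c)]
        (by rw [hof]; simp) (by rw [hof]; simp)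
        (by
          rw [hof]
          intro p hp
          rcases List.mem_cons.mp hp with rfl | hp'
          · exact .refl _ hOks not_false
          · simp at hp')
        (by rw [hof]; exact fun p hp => hp)
        (by
          rw [hof]
          intro p hp q _ _
          exact Or.inr hp)
        (by
          have := pvRemain_le rows cols (PySem.Set.ofList [(r, c)])
          omega)
      have hperm : Δ.Perm (pvGrowB grid rows cols (pvGGet grid r c)
          (rows.toNat * cols.toNat + 1) (PySem.Set.ofList [(r, c)]) [(r, c)]) :=
        (List.perm_ext_iff_of_nodup hΔnd hndB).mpr
          (fun a => (hΔiff a).trans (hmemB a).symm)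
      -- reduce both programs one step
      simp only [pvColsA, pvColsB]
      rw [if_pos ⟨hcol0, hnvis⟩, if_pos hfireB]
      have hc2 : (pvFillA grid rows cols (pvGGet grid r c)
          (5 * (rows.toNat * cols.toNat) + 1) [(r, c)] V []).2 = Δ := by
        rw [hcells, List.nil_append]
      rw [hc2]
      obtain ⟨hminF, hmaxF⟩ := pvMinMax_perm (Δ.map Prod.fst) _ (hperm.map Prod.fst)
      obtain ⟨hminS, hmaxS⟩ := pvMinMax_perm (Δ.map Prod.snd) _ (hperm.map Prod.snd)
      rw [hminF, hmaxF, hminS, hmaxS]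
      have hlen : ((Δ.length : Int)) = PySem.Set.len (pvGrowB grid rows cols (pvGGet grid r c)
          (rows.toNat * cols.toNat + 1) (PySem.Set.ofList [(r, c)]) [(r, c)]) := by
        rw [hperm.length_eq]
        rfl
      rw [hlen]
      split_ifs with hdec
      · exact Or.inl ⟨[[pvGGet grid r c]], rfl, rfl⟩
      · apply ihc _ _ hcs'
        refine ⟨hshA, PySem.Set.nodup_union seen _ hnd, ?_, ?_⟩
        · intro p
          rw [hiffA' p, PySem.Set.mem_union]
          exact or_congr (hcorr p) (hmemB p).symm
        · intro p q hp hq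
          rcases (hiffA' p).mp hp with h | h
          · exact (hiffA' q).mpr (Or.inl (hginv p q h hq))
          · have hokp := (pvReach_last grid rows cols (pvGGet grid r c) _ _ _ h).1
            have hq' : pvComp grid rows cols (pvGGet grid r c) p q := by
              rw [← hokp.2.2.2.2]; exact hq
            exact (hiffA' q).mpr (Or.inr
              (pvComp_trans grid rows cols (pvGGet grid r c) (r, c) p q h hq'))
    · have hfireB : ¬(pvGGet grid r c ≠ 0 ∧ ¬(PySem.Set.contains seen (r, c) = true)) := by
        rintro ⟨h1, h2⟩
        exact hfire ⟨h1, fun hv => h2 (hguard.mp hv)⟩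
      simp only [pvColsA, pvColsB]
      rw [if_neg hfire, if_neg hfireB]
      exact ihc V seen hcs' ⟨hsh, hnd, hcorr, hginv⟩

theorem pvRows_lockstep (grid : List (List Int)) (rows cols : Int) :
    ∀ (rs : List Int) (V : List (List Bool)) (seen : PySem.Set (Int × Int)),
      (∀ r ∈ rs, 0 ≤ r ∧ r < rows) → pvInv grid rows cols V seen →
      pvRowsA grid rows cols rs V = pvRowsB grid rows cols rs seen := by
  intro rs
  induction rs with
  | nil => intro V seen _ _; rfl
  | cons r rs ihr =>
    intro V seen hrs hinv
    have hr := hrs r List.mem_cons_self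
    have hcols := pvCols_lockstep grid rows cols r hr.1 hr.2 (PySem.List.pyRange 0 cols 1) V seen
      (fun c hc => PySem.List.mem_pyRange_one.mp hc) hinv
    rcases hcols with ⟨ans, hA, hB⟩ | ⟨V', seen', hA, hB, hinv'⟩
    · simp only [pvRowsA, pvRowsB]
      rw [hA, hB]
    · simp only [pvRowsA, pvRowsB]
      rw [hA, hB]
      exact ihr V' seen' (fun x hx => hrs x (List.mem_cons_of_mem _ hx)) hinv'

-- ===== VERDICT (by name: the statement is the Claim_ definition above) =====
theorem solve_b9b7f026_spec : Claim_equal_solve_b9b7f026 := by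
  intro grid _hdom _hpre
  unfold Spec_solve_b9b7f026
  simp only [solve_b9b7f026, solve_b9b7f026_alt]
  apply pvRows_lockstep
  · exact fun r hr => PySem.List.mem_pyRange_one.mp hr
  · refine ⟨pvShape_replicate _ _, List.nodup_nil, ?_, ?_⟩
    · intro p
      constructor
      · intro hp
        exact absurd hp (pvVtrue_replicate _ _ p)
      · intro hp
        simp [PySem.Set.empty] at hp
    · intro p q hp _
      exact absurd hp (pvVtrue_replicate _ _ p)
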